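-- pv_equiv track=rewrite | github.com/ArielJoe/Fibonacci-Shift-Cipher | main.py | fibShiftCipher
-- ===== SOURCE A (Python) =====
-- def fib(n):
--     if n < 2:
--         return n
--     return fib(n - 1) + fib(n - 2)
--
-- def fibShiftCipher(msg):
--     encoded = ''
--     cnt = 1
--     for char in msg:
--         unicode = ord(char)
--         shift = fib(cnt)
--
--         unicodeShift = unicode + shift
--
--         while unicodeShift > 90:
--             unicodeShift -= 26
--
--         encoded += chr(unicodeShift)
--
--         cnt += 1
--
--     if msg.islower():
--         return encoded.lower()
--     return encoded.upper()
-- ===== SOURCE B (Python) =====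
-- def fibShiftCipher(msg):
--     out = []
--     a, b = 1, 1  # rolling pair: a = fib(cnt), b = fib(cnt + 1)
--     for ch in msg:
--         u = ord(ch) + a
--         if u > 90:
--             u = 65 + (u - 65) % 26
--         out.append(chr(u))
--         a, b = b, a + b
--     enc = ''.join(out)
--     return enc.lower() if msg.islower() else enc.upper()
-- ===== Notes on version B (the rewrite author's own statement) =====
-- stated objective: faster
-- what changed: Replaces the exponential recursive fib with an iterative rolling Fibonacci pair carried through one pass, and replaces the repeated-subtraction while loop with a direct modular reduction (65 + (u-65) % 26); intended as asymptotically faster; measured B 4.91x at n=16, and A timed out at n=64 where B returned, so a timing run could not confirm a ratio at the largest size.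
import Mathlib
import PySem

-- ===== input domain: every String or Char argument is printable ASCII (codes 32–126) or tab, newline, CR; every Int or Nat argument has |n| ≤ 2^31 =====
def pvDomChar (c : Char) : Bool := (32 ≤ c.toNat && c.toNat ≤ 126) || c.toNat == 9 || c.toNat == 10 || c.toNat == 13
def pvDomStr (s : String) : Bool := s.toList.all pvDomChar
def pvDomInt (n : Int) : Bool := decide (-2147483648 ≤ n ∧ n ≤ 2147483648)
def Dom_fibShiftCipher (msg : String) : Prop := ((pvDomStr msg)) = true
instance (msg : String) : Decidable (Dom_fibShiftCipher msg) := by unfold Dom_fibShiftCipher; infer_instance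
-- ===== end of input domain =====

-- B replaces A's exponential recursive fib with a rolling Fibonacci pair and the
-- repeated-subtraction while loop with one modular reduction; same return value
-- (intended as faster; measured 4.91x at n=16, A timed out at n=64 where B returned).

-- Hand-port of Python's str.islower() (no PySem primitive): at least one cased
-- character and no uppercase one; exact on ASCII. Shared by both ports, since
-- both Pythons end with the same literal `msg.islower()` call.
def pyStrIslower (cs : List Char) : Bool :=
  cs.any PySem.Chars.islower && cs.all (fun c => !PySem.Chars.isupper c)

-- ===== PORT A =====
-- A's recursive fib, literally (Python terminates for every int: n < 2 returns n).
def fibA (n : Int) : Int :=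
  if n < 2 then n else fibA (n - 1) + fibA (n - 2)
termination_by n.toNat
decreasing_by all_goals omega

-- A's `while unicodeShift > 90: unicodeShift -= 26`, literally.
def whileA (u : Int) : Int :=
  if u > 90 then whileA (u - 26) else u
termination_by (u - 90).toNat
decreasing_by omega

def fibShiftCipher (msg : String) : String :=
  let r := msg.toList.foldl
    (fun (st : List Char × Int) ch =>
      let unicode : Int := (ch.toNat : Int)
      let shift := fibA st.2
      let unicodeShift := whileA (unicode + shift)
      (st.1 ++ [Char.ofNat unicodeShift.toNat], st.2 + 1))
    ([], 1)
  if pyStrIslower msg.toList then String.ofList (PySem.Chars.lower r.1)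
  else String.ofList (PySem.Chars.upper r.1)

-- ===== PORT B =====
def fibShiftCipher_alt (msg : String) : String :=
  let r := msg.toList.foldl
    (fun (st : List Char × Int × Int) ch =>
      let u : Int := (ch.toNat : Int) + st.2.1
      let u' := if u > 90 then 65 + PySem.Int.mod (u - 65) 26 else u
      (st.1 ++ [Char.ofNat u'.toNat], st.2.2, st.2.1 + st.2.2))
    ([], 1, 1)
  if pyStrIslower msg.toList then String.ofList (PySem.Chars.lower r.1)
  else String.ofList (PySem.Chars.upper r.1)

-- ===== PRECONDITION & SPEC =====
def Spec_fibShiftCipher (msg : String) (out : String) : Prop := out = fibShiftCipher_alt msg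
instance (msg : String) (out : String) : Decidable (Spec_fibShiftCipher msg out) := by unfold Spec_fibShiftCipher; infer_instance

-- ===== CLAIM (what is proved, stated in full; the proofs are below) =====
def Claim_equal_fibShiftCipher : Prop := ∀ (msg : String), Dom_fibShiftCipher msg → Spec_fibShiftCipher msg (fibShiftCipher msg)

-- ===== LEMMAS AND PROOFS =====

lemma fibA_add_two (k : Int) (hk : 0 ≤ k) :
    fibA (k + 2) = fibA (k + 1) + fibA k := by
  rw [fibA]
  have h : ¬ (k + 2 < 2) := by omega
  simp [h, show k + 2 - 1 = k + 1 by ring, show k + 2 - 2 = k by ring]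

lemma whileA_eq_emod (u : Int) :
    whileA u = if u > 90 then 65 + (u - 65) % 26 else u := by
  induction u using whileA.induct with
  | case1 u h ih =>
    rw [whileA, if_pos h, ih, if_pos h]
    split_ifs with h2 <;> omega
  | case2 u h =>
    rw [whileA]
    simp [h]

lemma whileA_eq (u : Int) :
    whileA u = if u > 90 then 65 + PySem.Int.mod (u - 65) 26 else u := by
  rw [PySem.Int.mod_eq_emod_of_pos (by norm_num)]
  exact whileA_eq_emod u

lemma loop_eq (cs : List Char) : ∀ (acc : List Char) (k : Int), 0 ≤ k →
    (cs.foldl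
      (fun (st : List Char × Int) ch =>
        let unicode : Int := (ch.toNat : Int)
        let shift := fibA st.2
        let unicodeShift := whileA (unicode + shift)
        (st.1 ++ [Char.ofNat unicodeShift.toNat], st.2 + 1))
      (acc, k)).1
    =
    (cs.foldl
      (fun (st : List Char × Int × Int) ch =>
        let u : Int := (ch.toNat : Int) + st.2.1
        let u' := if u > 90 then 65 + PySem.Int.mod (u - 65) 26 else u
        (st.1 ++ [Char.ofNat u'.toNat], st.2.2, st.2.1 + st.2.2))
      (acc, fibA k, fibA (k + 1))).1 := by
  induction cs with
  | nil => intro acc k hk; rfl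
  | cons ch cs ih =>
    intro acc k hk
    simp only [List.foldl_cons]
    have hw := whileA_eq ((ch.toNat : Int) + fibA k)
    rw [hw]
    have hnext := ih (acc ++ [Char.ofNat (if ((ch.toNat : Int) + fibA k) > 90
        then 65 + PySem.Int.mod (((ch.toNat : Int) + fibA k) - 65) 26
        else (ch.toNat : Int) + fibA k).toNat]) (k + 1) (by omega)
    have e : fibA (k + 1 + 1) = fibA k + fibA (k + 1) := by
      rw [show k + 1 + 1 = k + 2 by ring, fibA_add_two k hk]; ring
    rw [e] at hnext
    exact hnext

-- ===== VERDICT (by name: the statement is the Claim_ definition above) =====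
theorem fibShiftCipher_spec : Claim_equal_fibShiftCipher := by
  intro msg _
  unfold Spec_fibShiftCipher fibShiftCipher fibShiftCipher_alt
  have h := loop_eq msg.toList [] 1 (by norm_num)
  have h0 : fibA 0 = 0 := by rw [fibA]; norm_num
  have h1 : fibA 1 = 1 := by rw [fibA]; norm_num
  have h2 : fibA (1 + 1) = 1 := by
    rw [show (1 : Int) + 1 = 0 + 2 by ring, fibA_add_two 0 (by norm_num)]
    norm_num [h0, h1]
  rw [h1, h2] at h
  simp only []
  rw [h]
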